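-- pv_equiv track=rewrite | github.com/ljm0850/algo-problem | baekjoon/2157 여행.py | solution
-- ===== SOURCE A (Python) =====
-- def solution(N:int,M:int,graph:list,r_graph:list)->int:
--     # dp[a][b] 는 b개의 도시를 거쳐 a 지점에 도착했을때 최대값
--     dp = [[0]*(M+1) for _ in range(N+1)]
--     # 1에서 출발함, 2개 도시 거쳤을때 세팅
--     for i in range(2,N+1):
--         dp[i][2] = graph[1][i]
--     # i는 도시, j는 거쳐간 도시의 수, k는 i로 도로가 뚫린 i 미만의 도시
--     for i in range(2,N+1):
--         for j in range(3,M+1):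
--             for k in r_graph[i]:
--                 if graph[k][i] and dp[k][j-1]:
--                     dp[i][j] = max(dp[i][j],dp[k][j-1]+graph[k][i])
--     return max(dp[N])
-- ===== SOURCE B (Python) =====
-- def solution(N: int, M: int, graph: list, r_graph: list) -> int:
--     # Top-down memoized recursion over the forward DAG.
--     # f(i, j) = best total value of a path 1 -> ... -> i visiting exactly j cities
--     # (0 when no such path; paths only ever end at cities i >= 2).
--     from functools import lru_cache
--
--     @lru_cache(maxsize=None)
--     def f(i: int, j: int) -> int:
--         if i < 2:
--             return 0
--         if j == 2:
--             return graph[1][i]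
--         best = 0
--         for k in r_graph[i]:
--             w = graph[k][i]
--             if w:
--                 prev = f(k, j - 1)
--                 if prev:
--                     cand = prev + w
--                     if cand > best:
--                         best = cand
--         return best
--
--     ans = 0
--     for j in range(2, M + 1):
--         v = f(N, j)
--         if v > ans:
--             ans = v
--     return ans
-- ===== Notes on version B (the rewrite author's own statement) =====
-- stated objective: alternative
-- what changed: Replaced the bottom-up (N+1)x(M+1) dp table filled by three nested index loops with a top-down lru_cache-memoized recursion f(i,j) over the forward DAG, computing only states reachable from the answer max over f(N,j).
-- outside the precondition, e.g. on solution(2, 3, [[0, 0, 0], [0, 0, 1], [0, 0, 5]], [[], [], [-1]]): A returns 6, B returns 1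
import Mathlib
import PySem

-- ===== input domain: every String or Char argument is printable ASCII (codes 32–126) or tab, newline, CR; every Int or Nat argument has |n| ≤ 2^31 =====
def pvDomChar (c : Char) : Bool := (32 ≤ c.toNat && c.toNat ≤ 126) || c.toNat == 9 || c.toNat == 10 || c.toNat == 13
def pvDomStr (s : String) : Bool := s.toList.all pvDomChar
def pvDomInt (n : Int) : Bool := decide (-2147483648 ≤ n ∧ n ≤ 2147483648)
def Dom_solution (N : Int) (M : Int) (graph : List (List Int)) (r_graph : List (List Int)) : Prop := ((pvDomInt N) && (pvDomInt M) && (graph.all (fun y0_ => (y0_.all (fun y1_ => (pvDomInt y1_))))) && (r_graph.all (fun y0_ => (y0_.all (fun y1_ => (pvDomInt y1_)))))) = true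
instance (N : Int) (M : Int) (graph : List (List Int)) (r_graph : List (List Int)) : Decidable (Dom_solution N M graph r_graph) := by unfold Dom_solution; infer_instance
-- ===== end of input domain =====

-- B replaces A's bottom-up (N+1)x(M+1) dp table (three nested index loops) by a
-- top-down memoized recursion f(i,j) over the forward DAG; objective: alternative.


-- ===== PORT A =====
-- graph[k][i]  (indices in range inside Pre_; pyGetD is exact there)
def pvCell (g : List (List Int)) (k i : Int) : Int :=
  PySem.List.pyGetD (PySem.List.pyGetD g k []) i 0

-- dp[i][j] = v
def pvSetCell (dp : List (List Int)) (i j v : Int) : List (List Int) :=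
  PySem.List.pySetD dp i (PySem.List.pySetD (PySem.List.pyGetD dp i []) j v)

-- max(xs) for nonempty xs (Pre_ keeps dp[N] nonempty)
def pvPyMax (xs : List Int) : Int :=
  match xs with
  | [] => 0
  | h :: t => t.foldl max h

def solution (N : Int) (M : Int) (graph : List (List Int)) (r_graph : List (List Int)) : Int :=
  let dp0 : List (List Int) :=
    List.replicate (N + 1).toNat (List.replicate (M + 1).toNat (0 : Int))
  let dp1 := (PySem.List.pyRange 2 (N + 1) 1).foldl
    (fun dp i => pvSetCell dp i 2 (pvCell graph 1 i)) dp0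
  let dp2 := (PySem.List.pyRange 2 (N + 1) 1).foldl
    (fun dp i =>
      (PySem.List.pyRange 3 (M + 1) 1).foldl
        (fun dp j =>
          (PySem.List.pyGetD r_graph i []).foldl
            (fun dp k =>
              if pvCell graph k i ≠ 0 ∧ pvCell dp k (j - 1) ≠ 0 then
                pvSetCell dp i j (max (pvCell dp i j) (pvCell dp k (j - 1) + pvCell graph k i))
              else dp)
            dp)
        dp)
    dp1
  pvPyMax (PySem.List.pyGetD dp2 N [])

-- ===== PORT B =====
-- f(i, j) of Source B; the memoized recursion, j (number of cities) as the structural fuel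
def pvF (graph r_graph : List (List Int)) : Nat → Int → Int
  | 0, _ => 0     -- never called by solution_alt (j ranges over 2..M)
  | 1, _ => 0     -- never called by solution_alt
  | 2, i => if i < 2 then 0 else pvCell graph 1 i
  | (jj + 3), i =>
      if i < 2 then 0
      else
        (PySem.List.pyGetD r_graph i []).foldl
          (fun best k =>
            let w := pvCell graph k i
            if w ≠ 0 then
              let prev := pvF graph r_graph (jj + 2) k
              if prev ≠ 0 then
                (if prev + w > best then prev + w else best)
              else best
            else best)
          0

def solution_alt (N : Int) (M : Int) (graph : List (List Int)) (r_graph : List (List Int)) : Int :=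
  (PySem.List.pyRange 2 (M + 1) 1).foldl
    (fun ans j =>
      let v := pvF graph r_graph j.toNat N
      if v > ans then v else ans)
    0

-- ===== PRECONDITION & SPEC =====
-- Pre_ excludes inputs where A raises (negative N/M, missing rows/columns, dp[i][2] with M < 2,
-- r_graph entries indexing outside graph or dp) and inputs with a backward, self or negative
-- r_graph entry (k ≥ i, or k < 0 wrapping around), on which A's value depends on reading a
-- dp cell that is not finalized — an artefact of A's loop order (the problem's reverse
-- adjacency lists only hold forward edges 0 ≤ k < i).
def Pre_solution (N : Int) (M : Int) (graph : List (List Int)) (r_graph : List (List Int)) : Prop :=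
  0 ≤ N ∧ 0 ≤ M ∧
  (2 ≤ N →
    2 ≤ M ∧
    2 ≤ (graph.length : Int) ∧
    N + 1 ≤ ((graph.getD 1 []).length : Int) ∧
    (3 ≤ M →
      N + 1 ≤ (r_graph.length : Int) ∧
      (∀ i : Nat, i < r_graph.length → 2 ≤ (i : Int) → (i : Int) ≤ N →
        ∀ k ∈ r_graph.getD i [],
          (0 ≤ k ∧ k < (i : Int)) ∧
          k < (graph.length : Int) ∧ (i : Int) < ((graph.getD k.toNat []).length : Int))))
instance (N : Int) (M : Int) (graph : List (List Int)) (r_graph : List (List Int)) : Decidable (Pre_solution N M graph r_graph) := by unfold Pre_solution; infer_instance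

def pvWitness_solution : Int × Int × List (List Int) × List (List Int) :=
  (2, 3, [[0, 0, 0], [0, 0, 5], [0, 0, 0]], [[], [], [1]])

def Spec_solution (N : Int) (M : Int) (graph : List (List Int)) (r_graph : List (List Int)) (out : Int) : Prop := out = solution_alt N M graph r_graph
instance (N : Int) (M : Int) (graph : List (List Int)) (r_graph : List (List Int)) (out : Int) : Decidable (Spec_solution N M graph r_graph out) := by unfold Spec_solution; infer_instance

-- ===== CLAIM (what is proved, stated in full; the proofs are below) =====
def Claim_equal_solution : Prop := ∀ (N : Int) (M : Int) (graph : List (List Int)) (r_graph : List (List Int)), Dom_solution N M graph r_graph → Pre_solution N M graph r_graph → Spec_solution N M graph r_graph (solution N M graph r_graph)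


-- ===== LEMMAS AND PROOFS =====

-- Nat-indexed view of a dp cell
def pvCellN (dp : List (List Int)) (a b : Nat) : Int := (dp.getD a []).getD b 0

theorem pvCell_eq_cellN (dp : List (List Int)) (a b : Int) (ha : 0 ≤ a) (hb : 0 ≤ b) :
    pvCell dp a b = pvCellN dp a.toNat b.toNat := by
  unfold pvCell pvCellN
  rw [PySem.List.pyGetD_of_nonneg _ _ ha, PySem.List.pyGetD_of_nonneg _ _ hb]

theorem pvSetCell_eq (dp : List (List Int)) (i j v : Int) (hi : 0 ≤ i) (hj : 0 ≤ j) :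
    pvSetCell dp i j v = dp.set i.toNat ((dp.getD i.toNat []).set j.toNat v) := by
  unfold pvSetCell
  rw [PySem.List.pySetD_of_nonneg _ _ hi, PySem.List.pySetD_of_nonneg _ _ hj,
      PySem.List.pyGetD_of_nonneg _ _ hi]

theorem pvCellN_set (dp : List (List Int)) (i j : Nat) (v : Int) (a b : Nat)
    (hi : i < dp.length) (hj : j < (dp.getD i []).length) :
    pvCellN (dp.set i ((dp.getD i []).set j v)) a b
      = if a = i ∧ b = j then v else pvCellN dp a b := by
  unfold pvCellN
  by_cases hai : a = i
  · subst hai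
    have h1 : (dp.set a ((dp.getD a []).set j v)).getD a [] = (dp.getD a []).set j v := by
      simp [List.getD, hi]
    rw [h1]
    by_cases hbj : b = j
    · subst hbj
      have h2 : ((dp.getD a []).set b v)[b]? = some v := by
        rw [List.getElem?_set_self (by simpa using hj)]
      rw [List.getD_eq_getElem?_getD, h2]
      simp
    · simp [hbj, List.getD, List.getElem?_set_ne (fun h => hbj h.symm)]
  · have h1 : (dp.set i ((dp.getD i []).set j v)).getD a [] = dp.getD a [] := by
      simp [List.getD, List.getElem?_set_ne (fun h => hai h.symm)]
    rw [h1]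
    simp [hai]

-- rows of a set-cell keep their lengths
theorem pv_rows_set (dp : List (List Int)) (i j : Nat) (v : Int) (W : Nat)
    (hrows : ∀ r ∈ dp, r.length = W) (hi : i < dp.length) :
    ∀ r ∈ dp.set i ((dp.getD i []).set j v), r.length = W := by
  intro r hr
  rcases List.mem_or_eq_of_mem_set hr with h | h
  · exact hrows r h
  · subst h
    simp only [List.length_set]
    have : dp.getD i [] = dp[i] := by
      simp [List.getD, List.getElem?_eq_getElem hi]
    rw [this]
    exact hrows _ (List.getElem_mem hi)

-- f(k, n) = 0 for k < 2 (any n ≥ 2)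
theorem pvF_lt_two (g rg : List (List Int)) (n : Nat) (k : Int) (hk : k < 2) (hn : 2 ≤ n) :
    pvF g rg n k = 0 := by
  match n with
  | 0 => omega
  | 1 => omega
  | 2 => simp [pvF, hk]
  | (m + 3) => simp [pvF, hk]

-- unfolding f at j ≥ 3, i ≥ 2
theorem pvF_unfold (g rg : List (List Int)) (j t : Int) (hj : 3 ≤ j) (ht : 2 ≤ t) :
    pvF g rg j.toNat t =
      (PySem.List.pyGetD rg t []).foldl
        (fun best k =>
          let w := pvCell g k t
          if w ≠ 0 then
            let prev := pvF g rg (j - 1).toNat k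
            if prev ≠ 0 then (if prev + w > best then prev + w else best) else best
          else best) 0 := by
  obtain ⟨m, hm⟩ : ∃ m, j.toNat = m + 3 := ⟨(j - 3).toNat, by omega⟩
  rw [hm]
  have h2 : m + 2 = (j - 1).toNat := by omega
  simp only [pvF, if_neg (by omega : ¬ t < 2), h2]

-- generic invariant lemma for a foldl over range(a, b)
theorem pv_foldl_inv {sigma : Type} (f : sigma → Int → sigma) (Inv : Int → sigma → Prop)
    (n : Nat) : ∀ (a b : Int), (b - a).toNat = n → a ≤ b →
    (∀ t s, a ≤ t → t < b → Inv t s → Inv (t + 1) (f s t)) →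
    ∀ s, Inv a s → Inv b ((PySem.List.pyRange a b 1).foldl f s) := by
  induction n with
  | zero =>
    intro a b hn hab _ s hs
    have : a = b := by omega
    subst this
    rw [PySem.List.pyRange_one_eq_nil (le_refl a)]
    exact hs
  | succ n ih =>
    intro a b hn hab hstep s hs
    have hlt : a < b := by omega
    rw [PySem.List.pyRange_one_cons hlt, List.foldl_cons]
    exact ih (a + 1) b (by omega) (by omega)
      (fun t s' h1 h2 h3 => hstep t s' (by omega) h2 h3)
      (f s a) (hstep a s (le_refl a) hlt hs)

-- the dp-table value A maintains: rows < t fully done, row t done up to column s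
def pvModel (g rg : List (List Int)) (N M t s i j : Int) : Int :=
  if 2 ≤ i ∧ i ≤ N ∧ 2 ≤ j ∧ j ≤ M ∧ (j = 2 ∨ i < t ∨ (i = t ∧ j ≤ s)) then
    pvF g rg j.toNat i
  else 0

def pvInv (N M : Int) (v : Int → Int → Int) (dp : List (List Int)) : Prop :=
  dp.length = (N + 1).toNat ∧ (∀ r ∈ dp, r.length = (M + 1).toNat) ∧
  (∀ a b : Int, 0 ≤ a → a ≤ N → 0 ≤ b → b ≤ M → pvCell dp a b = v a b)

-- the inner k-loop: other cells untouched, cell (t,j) becomes the running max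
theorem pv_kfold (g rg : List (List Int)) (N M t j : Int)
    (hN : 2 ≤ N) (hM : 2 ≤ M) (ht2 : 2 ≤ t) (htN : t ≤ N) (hj3 : 3 ≤ j) (hjM : j ≤ M) :
    ∀ ks : List Int, (∀ k ∈ ks, 0 ≤ k ∧ k < t) →
    ∀ dp, dp.length = (N + 1).toNat → (∀ r ∈ dp, r.length = (M + 1).toNat) →
    (∀ a b : Int, 0 ≤ a → a ≤ N → 0 ≤ b → b ≤ M → ¬(a = t ∧ b = j) →
        pvCell dp a b = pvModel g rg N M t (j - 1) a b) →
    ((ks.foldl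
        (fun dp k =>
          if pvCell g k t ≠ 0 ∧ pvCell dp k (j - 1) ≠ 0 then
            pvSetCell dp t j (max (pvCell dp t j) (pvCell dp k (j - 1) + pvCell g k t))
          else dp) dp).length = (N + 1).toNat ∧
     (∀ r' ∈ ks.foldl
        (fun dp k =>
          if pvCell g k t ≠ 0 ∧ pvCell dp k (j - 1) ≠ 0 then
            pvSetCell dp t j (max (pvCell dp t j) (pvCell dp k (j - 1) + pvCell g k t))
          else dp) dp, r'.length = (M + 1).toNat) ∧
     (∀ a b : Int, 0 ≤ a → a ≤ N → 0 ≤ b → b ≤ M → ¬(a = t ∧ b = j) →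
        pvCell (ks.foldl
          (fun dp k =>
            if pvCell g k t ≠ 0 ∧ pvCell dp k (j - 1) ≠ 0 then
              pvSetCell dp t j (max (pvCell dp t j) (pvCell dp k (j - 1) + pvCell g k t))
            else dp) dp) a b = pvModel g rg N M t (j - 1) a b) ∧
     pvCell (ks.foldl
        (fun dp k =>
          if pvCell g k t ≠ 0 ∧ pvCell dp k (j - 1) ≠ 0 then
            pvSetCell dp t j (max (pvCell dp t j) (pvCell dp k (j - 1) + pvCell g k t))
          else dp) dp) t j
       = ks.foldl
          (fun best k =>
            if pvCell g k t ≠ 0 ∧ pvF g rg (j - 1).toNat k ≠ 0 then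
              max best (pvF g rg (j - 1).toNat k + pvCell g k t)
            else best) (pvCell dp t j)) := by
  intro ks
  induction ks with
  | nil =>
    intro _ dp hlen hrows hcells
    exact ⟨hlen, hrows, hcells, rfl⟩
  | cons k ks ih =>
    intro hks dp hlen hrows hcells
    obtain ⟨hk0, hkt⟩ := hks k (List.mem_cons_self)
    -- the value A reads for dp[k][j-1] is exactly f(k, j-1)
    have hread : pvCell dp k (j - 1) = pvF g rg (j - 1).toNat k := by
      have h1 := hcells k (j - 1) hk0 (by omega) (by omega) (by omega) (by omega)
      rw [h1]
      unfold pvModel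
      by_cases h2 : 2 ≤ k
      · rw [if_pos (by omega)]
      · rw [if_neg (by omega), pvF_lt_two g rg _ k (by omega) (by omega)]
    have htL : t.toNat < dp.length := by rw [hlen]; omega
    have hrowt : dp.getD t.toNat [] = dp[t.toNat] := by
      simp [List.getD, List.getElem?_eq_getElem htL]
    have hjW : j.toNat < (dp.getD t.toNat []).length := by
      rw [hrowt, hrows _ (List.getElem_mem htL)]; omega
    simp only [List.foldl_cons]
    by_cases hc : pvCell g k t ≠ 0 ∧ pvCell dp k (j - 1) ≠ 0
    · rw [if_pos hc]
      have hset := pvSetCell_eq dp t j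
        (max (pvCell dp t j) (pvCell dp k (j - 1) + pvCell g k t)) (by omega) (by omega)
      have hcell' : ∀ a b : Int, 0 ≤ a → 0 ≤ b →
          pvCell (pvSetCell dp t j (max (pvCell dp t j) (pvCell dp k (j - 1) + pvCell g k t))) a b
          = if a.toNat = t.toNat ∧ b.toNat = j.toNat then
              max (pvCell dp t j) (pvCell dp k (j - 1) + pvCell g k t)
            else pvCell dp a b := by
        intro a b ha hb
        rw [hset, pvCell_eq_cellN _ _ _ ha hb, pvCellN_set dp t.toNat j.toNat _ _ _ htL hjW,
            pvCell_eq_cellN _ _ _ ha hb]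
      have hlen' : (pvSetCell dp t j (max (pvCell dp t j) (pvCell dp k (j - 1) + pvCell g k t))).length
          = (N + 1).toNat := by rw [hset, List.length_set, hlen]
      have hrows' : ∀ r' ∈ pvSetCell dp t j
          (max (pvCell dp t j) (pvCell dp k (j - 1) + pvCell g k t)), r'.length = (M + 1).toNat := by
        rw [hset]
        exact pv_rows_set dp t.toNat j.toNat _ (M + 1).toNat hrows htL
      obtain ⟨c1, c2, c3, c4⟩ := ih (fun k hk => hks k (List.mem_cons_of_mem _ hk)) _ hlen' hrows'
        (by
          intro a b ha haN hb hbM hne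
          rw [hcell' a b ha hb, if_neg (by omega)]
          exact hcells a b ha haN hb hbM hne)
      refine ⟨c1, c2, c3, ?_⟩
      rw [c4, hcell' t j (by omega) (by omega), if_pos ⟨rfl, rfl⟩,
          if_pos (by rw [← hread]; exact hc), hread]
    · rw [if_neg hc]
      obtain ⟨c1, c2, c3, c4⟩ := ih (fun k hk => hks k (List.mem_cons_of_mem _ hk)) _ hlen hrows hcells
      refine ⟨c1, c2, c3, ?_⟩
      rw [c4, if_neg (by rw [← hread]; exact hc)]

-- the two scalar folds (A's max-shape, B's compare-shape) agree
theorem pv_scalar_fold_eq (g rg : List (List Int)) (t : Int) (n : Nat) (ks : List Int) (acc : Int) :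
    ks.foldl
      (fun best k =>
        if pvCell g k t ≠ 0 ∧ pvF g rg n k ≠ 0 then max best (pvF g rg n k + pvCell g k t)
        else best) acc
    = ks.foldl
      (fun best k =>
        let w := pvCell g k t
        if w ≠ 0 then
          let prev := pvF g rg n k
          if prev ≠ 0 then (if prev + w > best then prev + w else best) else best
        else best) acc := by
  congr 1
  funext best k
  by_cases hw : pvCell g k t = 0 <;> by_cases hp : pvF g rg n k = 0 <;>
    simp [hw, hp, max_def] <;> omega

-- after the whole double loop, the table is the full model
theorem pv_main_inv (g rg : List (List Int)) (N M : Int)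
    (hN : 2 ≤ N) (hM : 2 ≤ M)
    (hrg : 3 ≤ M → N + 1 ≤ (rg.length : Int) ∧
      (∀ i : Nat, i < rg.length → 2 ≤ (i : Int) → (i : Int) ≤ N →
        ∀ k ∈ rg.getD i [], 0 ≤ k ∧ k < (i : Int))) :
    ∀ dp, pvInv N M (pvModel g rg N M 2 2) dp →
    pvInv N M (pvModel g rg N M (N + 1) 2)
      ((PySem.List.pyRange 2 (N + 1) 1).foldl
        (fun dp i =>
          (PySem.List.pyRange 3 (M + 1) 1).foldl
            (fun dp j =>
              (PySem.List.pyGetD rg i []).foldl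
                (fun dp k =>
                  if pvCell g k i ≠ 0 ∧ pvCell dp k (j - 1) ≠ 0 then
                    pvSetCell dp i j (max (pvCell dp i j) (pvCell dp k (j - 1) + pvCell g k i))
                  else dp) dp) dp) dp) := by
  intro dp hInv
  apply pv_foldl_inv _ (fun t dpt => pvInv N M (pvModel g rg N M t 2) dpt)
    (N - 1).toNat 2 (N + 1) (by omega) (by omega) ?_ dp hInv
  intro t dpt ht2 htlt hInvt
  have key : pvInv N M (pvModel g rg N M t (M + 1 - 1))
      ((PySem.List.pyRange 3 (M + 1) 1).foldl
        (fun dpj j =>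
          (PySem.List.pyGetD rg t []).foldl
            (fun dp k =>
              if pvCell g k t ≠ 0 ∧ pvCell dp k (j - 1) ≠ 0 then
                pvSetCell dp t j (max (pvCell dp t j) (pvCell dp k (j - 1) + pvCell g k t))
              else dp) dpj) dpt) := by
    apply pv_foldl_inv _ (fun jx dpj => pvInv N M (pvModel g rg N M t (jx - 1)) dpj)
      (M - 2).toNat 3 (M + 1) (by omega) (by omega) ?_ dpt ?_
    · intro jx dpj hj3 hjlt hInvj
      obtain ⟨hlen, hrows, hcells⟩ := hInvj
      obtain ⟨hrgl, hrgk⟩ := hrg (by omega)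
      have htnat : ((t.toNat : Int)) = t := Int.toNat_of_nonneg (by omega)
      have hks : ∀ k ∈ PySem.List.pyGetD rg t [], 0 ≤ k ∧ k < t := by
        intro k hk
        rw [PySem.List.pyGetD_of_nonneg _ _ (by omega : (0:Int) ≤ t)] at hk
        have := hrgk t.toNat (by omega) (by omega) (by omega) k hk
        omega
      obtain ⟨c1, c2, c3, c4⟩ := pv_kfold g rg N M t jx hN hM ht2 (by omega) hj3 (by omega)
        (PySem.List.pyGetD rg t []) hks dpj hlen hrows
        (fun a b ha haN hb hbM _ => hcells a b ha haN hb hbM)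
      have h0 : pvCell dpj t jx = 0 := by
        rw [hcells t jx (by omega) (by omega) (by omega) (by omega)]
        unfold pvModel
        rw [if_neg (by omega)]
      rw [h0] at c4
      refine ⟨c1, c2, ?_⟩
      intro a b ha haN hb hbM
      by_cases hab : a = t ∧ b = jx
      · obtain ⟨rfl, rfl⟩ := hab
        rw [c4, pv_scalar_fold_eq, ← pvF_unfold g rg b a hj3 ht2]
        unfold pvModel
        rw [if_pos (by omega)]
      · rw [c3 a b ha haN hb hbM hab]
        unfold pvModel
        exact if_congr (by omega) rfl rfl
    · have e : (3 : Int) - 1 = 2 := by norm_num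
      rw [e]
      exact hInvt
  obtain ⟨k1, k2, k3⟩ := key
  refine ⟨k1, k2, ?_⟩
  intro a b ha haN hb hbM
  rw [k3 a b ha haN hb hbM]
  unfold pvModel
  exact if_congr (by omega) rfl rfl

-- the init loop establishes the t = 2 model
theorem pv_init_inv (g rg : List (List Int)) (N M : Int) (hN : 2 ≤ N) (hM : 2 ≤ M) :
    pvInv N M (pvModel g rg N M 2 2)
      ((PySem.List.pyRange 2 (N + 1) 1).foldl
        (fun dp i => pvSetCell dp i 2 (pvCell g 1 i))
        (List.replicate (N + 1).toNat (List.replicate (M + 1).toNat (0 : Int)))) := by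
  have main := pv_foldl_inv (fun dp i => pvSetCell dp i 2 (pvCell g 1 i))
    (fun t dpt => dpt.length = (N + 1).toNat ∧ (∀ r ∈ dpt, r.length = (M + 1).toNat) ∧
      (∀ a b : Int, 0 ≤ a → a ≤ N → 0 ≤ b → b ≤ M →
        pvCell dpt a b = if 2 ≤ a ∧ a < t ∧ b = 2 then pvCell g 1 a else 0))
    (N - 1).toNat 2 (N + 1) (by omega) (by omega) ?step
    (List.replicate (N + 1).toNat (List.replicate (M + 1).toNat (0 : Int))) ?start
  case step =>
    intro t dpt ht2 htlt hInv
    beta_reduce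
    obtain ⟨hlen, hrows, hcells⟩ := hInv
    have htL : t.toNat < dpt.length := by rw [hlen]; omega
    have hrowt : dpt.getD t.toNat [] = dpt[t.toNat] := by
      simp [List.getD, List.getElem?_eq_getElem htL]
    have h2W : (2 : Nat) < (dpt.getD t.toNat []).length := by
      rw [hrowt, hrows _ (List.getElem_mem htL)]; omega
    have hset := pvSetCell_eq dpt t 2 (pvCell g 1 t) (by omega) (by norm_num)
    have h2nat : ((2 : Int)).toNat = 2 := rfl
    refine ⟨by rw [hset, List.length_set, hlen], ?_, ?_⟩
    · rw [hset]
      exact pv_rows_set dpt t.toNat (Int.toNat 2) (pvCell g 1 t) (M + 1).toNat hrows htL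
    · intro a b ha haN hb hbM
      rw [pvCell_eq_cellN _ _ _ ha hb, hset,
          pvCellN_set dpt t.toNat (Int.toNat 2) _ _ _ htL (by omega)]
      by_cases hab : a.toNat = t.toNat ∧ b.toNat = Int.toNat 2
      · rw [if_pos hab, if_pos (by omega)]
        have : a = t := by omega
        rw [this]
      · rw [if_neg hab, ← pvCell_eq_cellN _ _ _ ha hb,
            hcells a b ha haN hb hbM]
        exact if_congr (by omega) rfl rfl
  case start =>
    refine ⟨by simp, by intro r hr; simp_all [List.eq_of_mem_replicate hr], ?_⟩
    intro a b ha haN hb hbM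
    rw [if_neg (by omega), pvCell_eq_cellN _ _ _ ha hb]
    unfold pvCellN
    have h1 : (List.replicate (N + 1).toNat (List.replicate (M + 1).toNat (0 : Int))).getD a.toNat []
        = List.replicate (M + 1).toNat (0 : Int) := by
      simp [List.getD, show a.toNat < (N + 1).toNat by omega]
    rw [h1]
    simp [List.getD, show b.toNat < (M + 1).toNat by omega]
  obtain ⟨hlen, hrows, hcells⟩ := main
  refine ⟨hlen, hrows, ?_⟩
  intro a b ha haN hb hbM
  rw [hcells a b ha haN hb hbM]
  unfold pvModel
  by_cases hb2 : b = 2 ∧ 2 ≤ a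
  · obtain ⟨rfl, h2a⟩ := hb2
    rw [if_pos (by omega), if_pos (by omega)]
    have : ((2 : Int)).toNat = 2 := rfl
    rw [this]
    simp only [pvF]
    rw [if_neg (by omega)]
  · rw [if_neg (by omega), if_neg (by omega)]

theorem pv_foldl_max_replicate_zero : ∀ n : Nat, (List.replicate n (0 : Int)).foldl max 0 = 0 := by
  intro n
  induction n with
  | zero => rfl
  | succ n ih => simpa [List.replicate_succ] using ih

-- B returns 0 when N < 2
theorem pv_alt_of_N_small (g rg : List (List Int)) (N : Int) (hN : N < 2) :
    ∀ l : List Int, (∀ j ∈ l, 2 ≤ j) →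
      l.foldl (fun ans j => let v := pvF g rg j.toNat N; if v > ans then v else ans) 0 = 0 := by
  intro l
  induction l with
  | nil => intro _; rfl
  | cons j l ih =>
    intro hl
    have h2j : 2 ≤ j := hl j List.mem_cons_self
    have hv : pvF g rg j.toNat N = 0 := pvF_lt_two g rg j.toNat N hN (by omega)
    simp only [List.foldl_cons, hv]
    rw [if_neg (by omega)]
    exact ih (fun j hj => hl j (List.mem_cons_of_mem _ hj))

theorem pv_if_max (aa vv : Int) : (if vv > aa then vv else aa) = max aa vv := by
  rw [max_def]; split_ifs <;> omega


-- the final max over dp[N] equals B's running max over f(N, 2..M)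
theorem pv_final_max (g rg : List (List Int)) (N M : Int) (hM : 2 ≤ M) (E : Nat → Int)
    (hE0 : E 0 = 0) (hE1 : E 1 = 0)
    (hE : ∀ b : Nat, 2 ≤ b → (b : Int) ≤ M → E b = pvF g rg b N) :
    pvPyMax ((List.range (M + 1).toNat).map E)
      = (PySem.List.pyRange 2 (M + 1) 1).foldl
          (fun ans j => let v := pvF g rg j.toNat N; if v > ans then v else ans) 0 := by
  have hW : (M + 1).toNat = (M.toNat - 1) + 2 := by omega
  set m := M.toNat - 1 with hm
  have hL : pvPyMax ((List.range (M + 1).toNat).map E)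
      = (List.range m).foldl (fun acc k => max acc (E (k + 2))) 0 := by
    rw [hW, List.range_succ_eq_map, List.range_succ_eq_map]
    simp only [List.map_cons, List.map_map]
    show (List.map (E ∘ Nat.succ ∘ Nat.succ) (List.range m)).foldl max (max (E 0) (E 1)) = _
    rw [hE0, hE1, List.foldl_map]
    norm_num
  have hR : (PySem.List.pyRange 2 (M + 1) 1).foldl
      (fun ans j => let v := pvF g rg j.toNat N; if v > ans then v else ans) 0
      = (List.range m).foldl (fun acc k => max acc (pvF g rg (k + 2) N)) 0 := by
    rw [PySem.List.pyRange_one, List.foldl_map]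
    have hlen : (M + 1 - 2).toNat = m := by omega
    rw [hlen]
    apply PySem.List.foldl_congr_mem
    intro acc k _
    have h1 : ((2 : Int) + (k : Nat)).toNat = k + 2 := by omega
    simp only [h1, pv_if_max]
  rw [hL, hR]
  apply PySem.List.foldl_congr_mem
  intro acc k hk
  rw [List.mem_range] at hk
  rw [hE (k + 2) (by omega) (by omega)]

-- ===== VERDICT (by name: the statement is the Claim_ definition above) =====
theorem solution_spec : Claim_equal_solution := by
  intro N M g rg _ hPre
  obtain ⟨hN0, hM0, hPre2⟩ := hPre
  unfold Spec_solution solution solution_alt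
  dsimp only
  by_cases hN2 : 2 ≤ N
  · obtain ⟨hM2, hglen, hgrows, hrg⟩ := hPre2 hN2
    have hrg' : 3 ≤ M → N + 1 ≤ (rg.length : Int) ∧
        (∀ i : Nat, i < rg.length → 2 ≤ (i : Int) → (i : Int) ≤ N →
          ∀ k ∈ rg.getD i [], 0 ≤ k ∧ k < (i : Int)) := by
      intro h3
      obtain ⟨h1, h2⟩ := hrg h3
      exact ⟨h1, fun i hi h2i hiN k hk => (h2 i hi h2i hiN k hk).1⟩
    have hinit := pv_init_inv g rg N M hN2 hM2
    have hmain := pv_main_inv g rg N M hN2 hM2 hrg' _ hinit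
    obtain ⟨hlen, hrows, hcells⟩ := hmain
    set dp2 := (PySem.List.pyRange 2 (N + 1) 1).foldl
      (fun dp i =>
        (PySem.List.pyRange 3 (M + 1) 1).foldl
          (fun dp j =>
            (PySem.List.pyGetD rg i []).foldl
              (fun dp k =>
                if pvCell g k i ≠ 0 ∧ pvCell dp k (j - 1) ≠ 0 then
                  pvSetCell dp i j (max (pvCell dp i j) (pvCell dp k (j - 1) + pvCell g k i))
                else dp) dp) dp)
      ((PySem.List.pyRange 2 (N + 1) 1).foldl
        (fun dp i => pvSetCell dp i 2 (pvCell g 1 i))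
        (List.replicate (N + 1).toNat (List.replicate (M + 1).toNat (0 : Int)))) with hdp2
    have hNL : N.toNat < dp2.length := by rw [hlen]; omega
    have hrowN : PySem.List.pyGetD dp2 N [] = dp2[N.toNat] := by
      rw [PySem.List.pyGetD_of_nonneg _ _ hN0]
      simp [List.getD, List.getElem?_eq_getElem hNL]
    have hrowlen : dp2[N.toNat].length = (M + 1).toNat := hrows _ (List.getElem_mem hNL)
    have hrowEq : dp2[N.toNat] = (List.range (M + 1).toNat).map
        (fun b : Nat => if 2 ≤ b ∧ (b : Int) ≤ M then pvF g rg b N else 0) := by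
      apply List.ext_getElem
      · simp [hrowlen]
      · intro i hi hi2
        have hiW : i < (M + 1).toNat := by rwa [hrowlen] at hi
        have hcell := hcells N (i : Int) hN0 (le_refl N) (by omega) (by omega)
        rw [pvCell_eq_cellN _ _ _ hN0 (by omega : (0:Int) ≤ (i : Int))] at hcell
        have hti : ((i : Int)).toNat = i := by omega
        rw [hti] at hcell
        unfold pvCellN at hcell
        have hgd : dp2.getD N.toNat [] = dp2[N.toNat] := by
          simp [List.getD, List.getElem?_eq_getElem hNL]
        rw [hgd] at hcell
        have hgd2 : dp2[N.toNat].getD i 0 = dp2[N.toNat][i] := by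
          simp [List.getD, List.getElem?_eq_getElem hi]
        rw [hgd2] at hcell
        rw [hcell]
        unfold pvModel
        rw [List.getElem_map, List.getElem_range]
        by_cases hcond : 2 ≤ i ∧ (i : Int) ≤ M
        · rw [if_pos (by omega), if_pos hcond, hti]
        · rw [if_neg (by omega), if_neg hcond]
    rw [hrowN, hrowEq]
    exact pv_final_max g rg N M hM2 _ (by norm_num) (by norm_num)
      (fun b h2b hbM => by rw [if_pos ⟨h2b, hbM⟩])
  · -- N is 0 or 1: the table stays all-zero and every f(N, j) is 0
    rw [PySem.List.pyRange_one_eq_nil (by omega : N + 1 ≤ 2)]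
    simp only [List.foldl_nil]
    have hNL : N.toNat < (N + 1).toNat := by omega
    have h1 : PySem.List.pyGetD
        (List.replicate (N + 1).toNat (List.replicate (M + 1).toNat (0 : Int))) N []
        = List.replicate (M + 1).toNat (0 : Int) := by
      rw [PySem.List.pyGetD_of_nonneg _ _ hN0]
      simp [List.getD, hNL]
    rw [h1]
    have hW : (M + 1).toNat = M.toNat + 1 := by omega
    rw [hW]
    have hA : pvPyMax (List.replicate (M.toNat + 1) (0 : Int)) = 0 := by
      rw [List.replicate_succ]
      show (List.replicate M.toNat (0 : Int)).foldl max 0 = 0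
      exact pv_foldl_max_replicate_zero M.toNat
    rw [hA]
    exact (pv_alt_of_N_small g rg N (by omega) _
      (fun j hj => (PySem.List.mem_pyRange_one.mp hj).1)).symm
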